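-- pv_equiv track=rewrite | github.com/aqilputi/projeto-pdi | Demo/color_labelling.py | label_colors
-- ===== SOURCE A (Python) =====
-- def label_colors(colors):
--     labels = [[],[],[]]
--     for index,row in enumerate(colors, start=0):
--         for value in row:
--             HUE = value[0]
--             L = value[1]
--             S = value[2]
--             #Checar se o pixel for Branco: L > 150 e S < 30, valores escolhidos
--             if L > 300:
--                 label = 'WHITE'
--             elif HUE > 55 and HUE <= 70:
--                 label = 'YELLOW'
--             elif HUE > 35 and HUE <= 55:
--                 label = 'ORANGE'
--             elif HUE > 165 and HUE <= 265:
--                 label = 'BLUE'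
--             elif HUE > 70 and HUE <= 165:
--                 label = 'GREEN'
--             else:
--                 label = 'RED'
--             labels[index].append(label)
--     return labels
-- ===== SOURCE B (Python) =====
-- # B: data-driven hue lookup (sorted threshold table scanned once per pixel)
-- # instead of A's if/elif comparison cascade; output built by comprehension and
-- # padded to the fixed 3-row shape instead of appending into a mutable 3-slot list.
--
-- _TABLE = [(35, 'RED'), (55, 'ORANGE'), (70, 'YELLOW'), (165, 'GREEN'), (265, 'BLUE')]
--
-- def _hue_label(hue):
--     for bound, label in _TABLE:
--         if hue <= bound:
--             return label
--     return 'RED'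
--
-- def label_colors(colors):
--     out = [['WHITE' if l > 300 else _hue_label(h) for (h, l, s) in row]
--            for row in colors]
--     out.extend([] for _ in range(len(out), 3))
--     return out
-- ===== Notes on version B (the rewrite author's own statement) =====
-- stated objective: simpler
-- what changed: Replaces A's if/elif hue comparison cascade and mutable fixed 3-slot accumulator with a sorted threshold table scanned per pixel and a list comprehension padded to three rows.
-- outside the precondition, e.g. on label_colors([[], [], [], []]): A returns [[], [], []], B returns [[], [], [], []]; on label_colors([[], [], [], [(10, 0, 0)]]): A raises IndexError, B returns [[], [], [], ['RED']]
import Mathlib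
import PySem

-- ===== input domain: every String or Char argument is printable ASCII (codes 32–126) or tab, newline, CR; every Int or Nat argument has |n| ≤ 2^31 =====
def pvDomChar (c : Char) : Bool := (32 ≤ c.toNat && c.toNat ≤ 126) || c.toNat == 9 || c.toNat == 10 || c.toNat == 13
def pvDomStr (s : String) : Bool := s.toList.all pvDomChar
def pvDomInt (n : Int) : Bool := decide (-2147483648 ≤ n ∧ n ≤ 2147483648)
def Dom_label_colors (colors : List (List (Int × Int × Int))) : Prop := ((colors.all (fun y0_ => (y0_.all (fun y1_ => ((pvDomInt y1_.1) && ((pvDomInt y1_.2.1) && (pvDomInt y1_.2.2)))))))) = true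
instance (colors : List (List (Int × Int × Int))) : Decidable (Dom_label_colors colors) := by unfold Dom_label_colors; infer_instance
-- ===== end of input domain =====

-- B replaces A's if/elif hue cascade with a sorted threshold-table scan and builds the
-- output by map + padding instead of appending into a mutable fixed 3-slot list (objective: simpler).

-- ===== PORT A =====
-- per-pixel branch cascade, in A's branch order
def pxLabelA (value : Int × Int × Int) : String :=
  let HUE := value.1
  let L := value.2.1
  if L > 300 then "WHITE"
  else if HUE > 55 ∧ HUE ≤ 70 then "YELLOW"
  else if HUE > 35 ∧ HUE ≤ 55 then "ORANGE"
  else if HUE > 165 ∧ HUE ≤ 265 then "BLUE"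
  else if HUE > 70 ∧ HUE ≤ 165 then "GREEN"
  else "RED"

-- labels[index].append(label) is List.modify; out-of-range modify is a no-op where
-- Python raises IndexError — exactly the inputs Pre_label_colors excludes.
def label_colors (colors : List (List (Int × Int × Int))) : List (List String) :=
  (PySem.List.enumerate colors 0).foldl
    (fun labels ir =>
      -- ir.1 comes from enumerate _ 0, hence is ≥ 0: .toNat never clamps a negative index here
      ir.2.foldl (fun ls value => ls.modify ir.1.toNat (fun r => r ++ [pxLabelA value])) labels)
    [[], [], []]

-- ===== PORT B =====
def hueTableB : List (Int × String) :=
  [(35, "RED"), (55, "ORANGE"), (70, "YELLOW"), (165, "GREEN"), (265, "BLUE")]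

def hueLabelB (hue : Int) : List (Int × String) → String
  | [] => "RED"
  | (bound, lab) :: rest => if hue ≤ bound then lab else hueLabelB hue rest

def pxLabelB (v : Int × Int × Int) : String :=
  if v.2.1 > 300 then "WHITE" else hueLabelB v.1 hueTableB

def label_colors_alt (colors : List (List (Int × Int × Int))) : List (List String) :=
  let out := colors.map (fun row => row.map pxLabelB)
  out ++ List.replicate (3 - out.length) []

-- ===== PRECONDITION & SPEC =====
-- Pre_ excludes inputs with more than three rows: A's fixed three-slot accumulator raises
-- IndexError on any pixel past the third row, and on all-empty trailing rows it drops them.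
def Pre_label_colors (colors : List (List (Int × Int × Int))) : Prop := colors.length ≤ 3
instance (colors : List (List (Int × Int × Int))) : Decidable (Pre_label_colors colors) := by
  unfold Pre_label_colors; infer_instance

def pvWitness_label_colors : (List (List (Int × Int × Int))) := [[(10, 10, 10), (60, 400, 0)], [(200, 0, 0)]]

def Spec_label_colors (colors : List (List (Int × Int × Int))) (out : List (List String)) : Prop := out = label_colors_alt colors
instance (colors : List (List (Int × Int × Int))) (out : List (List String)) : Decidable (Spec_label_colors colors out) := by unfold Spec_label_colors; infer_instance

-- ===== CLAIM (what is proved, stated in full; the proofs are below) =====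
def Claim_equal_label_colors : Prop := ∀ (colors : List (List (Int × Int × Int))), Dom_label_colors colors → Pre_label_colors colors → Spec_label_colors colors (label_colors colors)

-- ===== LEMMAS AND PROOFS =====

theorem px_eq (v : Int × Int × Int) : pxLabelA v = pxLabelB v := by
  obtain ⟨h, l, s⟩ := v
  simp only [pxLabelA, pxLabelB, hueLabelB, hueTableB]
  split_ifs <;> first | rfl | omega

theorem modify_comp {α : Type} (l : List α) (i : Nat) (f g : α → α) :
    (l.modify i f).modify i g = l.modify i (fun x => g (f x)) := by
  induction l generalizing i with
  | nil => simp
  | cons a t ih => cases i <;> simp [List.modify_cons, ih]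

theorem modify_id {α : Type} (l : List α) (i : Nat) : l.modify i (fun x => x) = l := by
  induction l generalizing i with
  | nil => simp
  | cons a t ih => cases i <;> simp [List.modify_cons, ih]

theorem rowfold (f : Int × Int × Int → String) (row : List (Int × Int × Int))
    (labels : List (List String)) (i : Nat) :
    row.foldl (fun ls value => ls.modify i (fun r => r ++ [f value])) labels
      = labels.modify i (fun r => r ++ row.map f) := by
  induction row generalizing labels with
  | nil => simpa using (modify_id labels i).symm
  | cons x rest ih =>
      simp only [List.foldl_cons, List.map_cons, ih, modify_comp, List.append_assoc,
        List.singleton_append]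

theorem label_colors_spec : Claim_equal_label_colors := by
  intro colors _ hpre
  have hpx : pxLabelA = pxLabelB := funext px_eq
  unfold Spec_label_colors
  rcases colors with _ | ⟨r0, _ | ⟨r1, _ | ⟨r2, _ | ⟨r3, t⟩⟩⟩⟩
  · rfl
  · simp only [label_colors, label_colors_alt, PySem.List.enumerate_cons, PySem.List.enumerate_nil, List.foldl_cons, List.foldl_nil,
      rowfold, hpx, List.map_cons, List.map_nil]
    rfl
  · simp only [label_colors, label_colors_alt, PySem.List.enumerate_cons, PySem.List.enumerate_nil, List.foldl_cons, List.foldl_nil,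
      rowfold, hpx, List.map_cons, List.map_nil]
    rfl
  · simp only [label_colors, label_colors_alt, PySem.List.enumerate_cons, PySem.List.enumerate_nil, List.foldl_cons, List.foldl_nil,
      rowfold, hpx, List.map_cons, List.map_nil]
    rfl
  · exfalso
    simp [Pre_label_colors] at hpre
    omega
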